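-- pv_equiv track=rewrite | github.com/Dev-Ian-Lee/algorithm | programmers/level2/word_chain_game.py | solution
-- ===== SOURCE A (Python) =====
-- def solution(n, words):
--     size = len(words)
--     mem = set()
--     pre = ""
--
--     for i in range(size):
--         curr = words[i]
--
--         if i == 0:
--             mem.add(curr)
--             pre = curr
--             continue
--
--         # 현재 단어가 이미 나왔을 경우 탈락자 발생
--         if curr in mem:
--             return finish_game(i, n)
--
--         else:
--             if pre[-1] == curr[0]:
--                 mem.add(curr)
--                 pre = curr
--
--             # 이전 단어의 마지막 글자와 현재 단어의 첫 글자가 다를 경우 탈락자 발생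
--             else:
--                 return finish_game(i, n)
--
--     return [0, 0]
--
-- def finish_game(i, n):
--     player = (i + 1) % n
--
--     if player == 0:
--         player = n
--
--     turns = 0
--     if (i + 1) % n == 0:
--         turns = (i + 1) // n
--
--     else:
--         turns = ((i + 1) // n) + 1
--
--     return [player, turns]
-- ===== SOURCE B (Python) =====
-- def solution(n, words):
--     # Scan 1: first chain break (adjacent pair whose letters don't link).
--     chain_break = None
--     for j, (u, v) in enumerate(zip(words, words[1:]), 1):
--         if u[-1:] != v[:1]:
--             chain_break = j
--             break
--     # Scan 2: first duplicate word.
--     dup = None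
--     seen = set()
--     for j, w in enumerate(words):
--         if w in seen:
--             dup = j
--             break
--         seen.add(w)
--     if chain_break is None and dup is None:
--         return [0, 0]
--     if chain_break is None:
--         fail = dup
--     elif dup is None:
--         fail = chain_break
--     else:
--         fail = min(chain_break, dup)
--     k = fail + 1
--     r = k % n
--     player = n if r == 0 else r
--     q = k // n
--     turns = q if r == 0 else q + 1
--     return [player, turns]
-- ===== Notes on version B (the rewrite author's own statement) =====
-- stated objective: alternative
-- what changed: A's single stateful scan (set of seen words plus previous-word state, failing at the first duplicate-or-chain-break) is replaced by two independent scans — the first adjacent chain break over zip(words, words[1:]) and the first duplicate word — whose candidate indices are combined by min before the player/turn arithmetic.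
-- outside the precondition, e.g. on solution(0, ['ab', 'ba']): A returns [0, 0], B returns [0, 0]
import Mathlib
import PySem

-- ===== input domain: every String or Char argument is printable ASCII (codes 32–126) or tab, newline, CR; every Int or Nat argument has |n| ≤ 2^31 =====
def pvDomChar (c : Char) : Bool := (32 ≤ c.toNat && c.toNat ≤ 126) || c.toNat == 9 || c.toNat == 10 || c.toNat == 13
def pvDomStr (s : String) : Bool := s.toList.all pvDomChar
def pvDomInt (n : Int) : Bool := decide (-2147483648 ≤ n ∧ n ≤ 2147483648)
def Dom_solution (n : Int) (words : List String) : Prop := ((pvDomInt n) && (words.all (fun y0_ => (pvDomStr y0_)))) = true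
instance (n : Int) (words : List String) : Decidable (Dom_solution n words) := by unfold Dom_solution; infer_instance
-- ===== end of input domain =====

-- B replaces A's single stateful scan by two independent scans (first chain break, first
-- duplicate) combined by min — a different decomposition of the same cost (objective: alternative).

-- ===== PORT A =====
def finishGame (i n : Int) : List Int :=
  let player0 := PySem.Int.mod (i + 1) n
  let player := if player0 = 0 then n else player0
  let turns := if PySem.Int.mod (i + 1) n = 0 then PySem.Int.floordiv (i + 1) n
               else PySem.Int.floordiv (i + 1) n + 1
  [player, turns]

def solutionGo (n : Int) (mem : PySem.Set String) (pre : String) (i : Int) : List String → List Int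
  | [] => [0, 0]
  | curr :: rest =>
    if PySem.Set.contains mem curr then finishGame i n
    else
      match PySem.Str.pyGet? pre (-1), PySem.Str.pyGet? curr 0 with
      | some a, some b =>
        if a = b then solutionGo n (PySem.Set.add mem curr) curr (i + 1) rest
        else finishGame i n
      | _, _ => finishGame i n  -- Python raises IndexError here (empty string; excluded by Pre_)

def solution (n : Int) (words : List String) : List Int :=
  match words with
  | [] => [0, 0]
  | w :: ws => solutionGo n (PySem.Set.add PySem.Set.empty w) w 1 ws

-- ===== PORT B =====
def chainGo (j : Int) : List (String × String) → Option Int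
  | [] => none
  | (u, v) :: rest =>
    if PySem.Str.slice u (some (-1)) none ≠ PySem.Str.slice v none (some 1) then some j
    else chainGo (j + 1) rest

def dupGo (seen : PySem.Set String) (j : Int) : List String → Option Int
  | [] => none
  | w :: rest =>
    if PySem.Set.contains seen w then some j
    else dupGo (PySem.Set.add seen w) (j + 1) rest

def finishAlt (n fail : Int) : List Int :=
  let k := fail + 1
  let r := PySem.Int.mod k n
  let player := if r = 0 then n else r
  let q := PySem.Int.floordiv k n
  let turns := if r = 0 then q else q + 1
  [player, turns]

def solution_alt (n : Int) (words : List String) : List Int :=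
  let chainBreak := chainGo 1 (words.zip words.tail)
  let dup := dupGo PySem.Set.empty 0 words
  match chainBreak, dup with
  | none, none => [0, 0]
  | some c, none => finishAlt n c
  | none, some d => finishAlt n d
  | some c, some d => finishAlt n (min c d)

-- ===== PRECONDITION & SPEC =====
-- Closed-form descriptions of positions in the word list (read directly off the input):
-- wordAt j = j-th word, dupAt j = word j already occurred earlier, brkAt j = both words j-1 and j
-- are nonempty and their letters do not link, errAt j = word j is not a duplicate but word j-1 or
-- word j is empty (there Python A evaluates ""[-1] or ""[0]).
def wordAt (words : List String) (j : Nat) : String := words.getD j ""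
def dupAt (words : List String) (j : Nat) : Bool := decide (wordAt words j ∈ words.take j)
def brkAt (words : List String) (j : Nat) : Bool :=
  decide (wordAt words (j - 1) ≠ "" ∧ wordAt words j ≠ "" ∧
    (wordAt words (j - 1)).toList.getLast? ≠ (wordAt words j).toList.head?)
def errAt (words : List String) (j : Nat) : Bool :=
  !dupAt words j && decide (wordAt words (j - 1) = "" ∨ wordAt words j = "")
def stopAt (words : List String) (j : Nat) : Bool := dupAt words j || brkAt words j || errAt words j

-- Pre_ excludes n = 0 (Python A raises ZeroDivisionError whenever a failure occurs, and B raises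
-- there too) and lists whose earliest failure position involves an empty-string word other than as
-- a duplicate (Python A raises IndexError on pre[-1]/curr[0] there).
def Pre_solution (n : Int) (words : List String) : Prop :=
  n ≠ 0 ∧ ∀ j < words.length, 1 ≤ j → errAt words j = true → ∃ k < j, 1 ≤ k ∧ stopAt words k = true
instance (n : Int) (words : List String) : Decidable (Pre_solution n words) := by
  unfold Pre_solution; infer_instance

def pvWitness_solution : Int × List String := (2, ["ab", "ba", "ab"])

def Spec_solution (n : Int) (words : List String) (out : List Int) : Prop := out = solution_alt n words
instance (n : Int) (words : List String) (out : List Int) : Decidable (Spec_solution n words out) := by unfold Spec_solution; infer_instance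

-- ===== CLAIM (what is proved, stated in full; the proofs are below) =====
def Claim_equal_solution : Prop := ∀ (n : Int) (words : List String), Dom_solution n words → Pre_solution n words → Spec_solution n words (solution n words)

-- ===== LEMMAS AND PROOFS =====

-- the two `finish` arithmetics compute the same list
lemma finishAlt_eq (n i : Int) : finishAlt n i = finishGame i n := rfl

-- B's combine step, named for the induction
def pvCombine (n : Int) : Option Int → Option Int → List Int
  | none, none => [0, 0]
  | some c, none => finishAlt n c
  | none, some d => finishAlt n d
  | some c, some d => finishAlt n (min c d)

lemma solution_alt_eq (n : Int) (words : List String) :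
    solution_alt n words =
      pvCombine n (chainGo 1 (words.zip words.tail)) (dupGo PySem.Set.empty 0 words) := by
  unfold solution_alt pvCombine
  rcases chainGo 1 (words.zip words.tail) with _ | c <;>
    rcases dupGo PySem.Set.empty 0 words with _ | d <;> rfl

lemma chainGo_ge : ∀ (l : List (String × String)) (j c : Int), chainGo j l = some c → j ≤ c := by
  intro l
  induction l with
  | nil => intro j c h; simp [chainGo] at h
  | cons p rest ih =>
    intro j c h
    obtain ⟨u, v⟩ := p
    unfold chainGo at h
    split at h
    · simp only [Option.some.injEq] at h; omega
    · have := ih (j + 1) c h; omega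

lemma dupGo_ge : ∀ (l : List String) (s : PySem.Set String) (j c : Int), dupGo s j l = some c → j ≤ c := by
  intro l
  induction l with
  | nil => intro s j c h; simp [dupGo] at h
  | cons w rest ih =>
    intro s j c h
    unfold dupGo at h
    split at h
    · simp only [Option.some.injEq] at h; omega
    · have := ih _ (j + 1) c h; omega

lemma toList_ne_nil (s : String) (h : s ≠ "") : s.toList ≠ [] := by
  intro hc; apply h; simpa using congrArg String.ofList hc

lemma strGet_neg_one (s : String) : PySem.Str.pyGet? s (-1) = s.toList.getLast? :=
  PySem.List.pyGet?_neg_one s.toList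

lemma strGet_zero (s : String) : PySem.Str.pyGet? s 0 = s.toList.head? := by
  rw [show PySem.Str.pyGet? s 0 = PySem.List.pyGet? s.toList 0 from rfl, PySem.List.pyGet?_zero]
  exact List.head?_eq_getElem?.symm

lemma drop_last_singleton (l : List Char) (a : Char) (h : l.getLast? = some a) :
    l.drop (l.length - 1) = [a] := by
  induction l with
  | nil => simp at h
  | cons x xs ih =>
    cases xs with
    | nil => simp_all
    | cons y ys =>
      rw [List.getLast?_cons_cons] at h
      simpa using ih h

lemma take_one_singleton (l : List Char) (a : Char) (h : l.head? = some a) : l.take 1 = [a] := by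
  cases l <;> simp_all

lemma slice_last_toList (s : String) (a : Char) (h : s.toList.getLast? = some a) :
    (PySem.Str.slice s (some (-1)) none).toList = [a] := by
  have h1 : (PySem.Str.slice s (some (-1)) none).toList = s.toList.drop (s.toList.length - 1) := by
    simp [PySem.Str.slice, PySem.Chars.slice_eq_listSlice, PySem.List.slice_some_none]
  rw [h1]; exact drop_last_singleton _ _ h

lemma slice_head_toList (s : String) (a : Char) (h : s.toList.head? = some a) :
    (PySem.Str.slice s none (some 1)).toList = [a] := by
  have h1 : (PySem.Str.slice s none (some 1)).toList = s.toList.take 1 := by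
    simp [PySem.Str.slice, PySem.Chars.slice_eq_listSlice, PySem.List.slice_to]
  rw [h1]; exact take_one_singleton _ _ h

lemma slice_eq_iff (u v : String) (a c : Char)
    (hu : u.toList.getLast? = some a) (hv : v.toList.head? = some c) :
    (PySem.Str.slice u (some (-1)) none = PySem.Str.slice v none (some 1)) ↔ a = c := by
  rw [← String.toList_inj, slice_last_toList u a hu, slice_head_toList v c hv]
  simp

-- the states from which A's scan runs to completion without hitting ""[-1]/""[0]
def Good (mem : PySem.Set String) (pre : String) : List String → Prop
  | [] => True
  | curr :: rs =>
    if PySem.Set.contains mem curr then True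
    else if pre = "" ∨ curr = "" then False
    else if pre.toList.getLast? ≠ curr.toList.head? then True
    else Good (PySem.Set.add mem curr) curr rs

lemma go_eq (n : Int) : ∀ (rest : List String) (mem : PySem.Set String) (pre : String) (i : Int),
    Good mem pre rest →
    solutionGo n mem pre i rest =
      pvCombine n (chainGo i ((pre :: rest).zip rest)) (dupGo mem i rest) := by
  intro rest
  induction rest with
  | nil => intro mem pre i _; rfl
  | cons curr rs ih =>
    intro mem pre i hg
    unfold Good at hg
    rw [List.zip_cons_cons]
    unfold solutionGo chainGo dupGo
    show (if PySem.Set.contains mem curr then finishGame i n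
          else match PySem.Str.pyGet? pre (-1), PySem.Str.pyGet? curr 0 with
               | some a, some b =>
                 if a = b then solutionGo n (PySem.Set.add mem curr) curr (i + 1) rs
                 else finishGame i n
               | _, _ => finishGame i n) =
         pvCombine n
           (if PySem.Str.slice pre (some (-1)) none ≠ PySem.Str.slice curr none (some 1) then some i
            else chainGo (i + 1) ((curr :: rs).zip rs))
           (if PySem.Set.contains mem curr then some i
            else dupGo (PySem.Set.add mem curr) (i + 1) rs)
    by_cases hmem : PySem.Set.contains mem curr
    · rw [if_pos hmem, if_pos hmem]
      by_cases hsl : PySem.Str.slice pre (some (-1)) none = PySem.Str.slice curr none (some 1)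
      · rw [if_neg (by simpa using hsl)]
        rcases hch : chainGo (i + 1) ((curr :: rs).zip rs) with _ | c
        · rfl
        · have hle := chainGo_ge _ _ _ hch
          show finishGame i n = finishAlt n (min c i)
          rw [min_eq_right (by omega), finishAlt_eq]
      · rw [if_pos (by simpa using hsl)]
        show finishGame i n = finishAlt n (min i i)
        rw [min_self, finishAlt_eq]
    · rw [if_neg hmem] at hg
      rw [if_neg hmem, if_neg hmem]
      by_cases hemp : pre = "" ∨ curr = ""
      · rw [if_pos hemp] at hg; exact hg.elim
      · rw [if_neg hemp] at hg
        push_neg at hemp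
        obtain ⟨ha, hc⟩ := hemp
        obtain ⟨a, hla⟩ := Option.isSome_iff_exists.mp
          (List.getLast?_isSome.mpr (toList_ne_nil pre ha))
        obtain ⟨c0, hhc⟩ := Option.isSome_iff_exists.mp
          (List.isSome_head?.mpr (toList_ne_nil curr hc))
        rw [strGet_neg_one, strGet_zero, hla, hhc]
        show (if a = c0 then solutionGo n (PySem.Set.add mem curr) curr (i + 1) rs
              else finishGame i n) =
             pvCombine n
               (if PySem.Str.slice pre (some (-1)) none ≠ PySem.Str.slice curr none (some 1) then some i
                else chainGo (i + 1) ((curr :: rs).zip rs))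
               (dupGo (PySem.Set.add mem curr) (i + 1) rs)
        by_cases hac : a = c0
        · rw [if_pos hac, if_neg (by simp [slice_eq_iff pre curr a c0 hla hhc, hac])]
          rw [if_neg (by simp [hla, hhc, hac])] at hg
          exact ih _ curr (i + 1) hg
        · rw [if_neg hac, if_pos (by simpa [slice_eq_iff pre curr a c0 hla hhc] using hac)]
          rcases hd : dupGo (PySem.Set.add mem curr) (i + 1) rs with _ | d
          · rfl
          · have hle := dupGo_ge _ _ _ _ hd
            show finishGame i n = finishAlt n (min i d)
            rw [min_eq_left (by omega), finishAlt_eq]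

lemma contains_iff_mem (s : PySem.Set String) (x : String) :
    PySem.Set.contains s x = true ↔ x ∈ s := by
  simp [PySem.Set.contains]

lemma good_of_pre (words : List String)
    (H : ∀ j < words.length, 1 ≤ j → errAt words j = true →
      ∃ k < j, 1 ≤ k ∧ stopAt words k = true) :
    ∀ (rest : List String) (i : Nat) (mem : PySem.Set String),
      1 ≤ i → words.drop i = rest →
      (∀ x, PySem.Set.contains mem x = true ↔ x ∈ words.take i) →
      (∀ k, 1 ≤ k → k < i → ¬ stopAt words k = true) →
      Good mem (wordAt words (i - 1)) rest := by
  intro rest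
  induction rest with
  | nil => intro i mem _ _ _ _; trivial
  | cons curr rs ih =>
    intro i mem hi hdrop hmem hnostop
    have hilen : i < words.length := by
      by_contra hle
      push_neg at hle
      rw [List.drop_eq_nil_of_le hle] at hdrop
      simp at hdrop
    have hget : words[i]? = some curr := by
      have h0 : (words.drop i)[0]? = some curr := by rw [hdrop]; rfl
      rwa [List.getElem?_drop, Nat.add_zero] at h0
    have hcurr : wordAt words i = curr := by
      simp [wordAt, List.getD, hget]
    have hrs : words.drop (i + 1) = rs := by
      have h1 := congrArg (List.drop 1) hdrop
      rw [List.drop_drop] at h1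
      simpa [Nat.add_comm] using h1
    unfold Good
    by_cases hmemc : PySem.Set.contains mem curr
    · rw [if_pos hmemc]; trivial
    · rw [if_neg hmemc]
      have hndup : ¬ dupAt words i = true := by
        simp only [dupAt, decide_eq_true_eq, hcurr]
        intro hin
        exact hmemc ((hmem curr).mpr hin)
      by_cases hemp : wordAt words (i - 1) = "" ∨ curr = ""
      · rw [if_pos hemp]
        have herr : errAt words i = true := by
          simp only [errAt, Bool.and_eq_true, Bool.not_eq_true', decide_eq_true_eq, hcurr]
          exact ⟨Bool.eq_false_iff.mpr hndup, hemp⟩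
        obtain ⟨k, hk, hk1, hst⟩ := H i hilen hi herr
        exact hnostop k hk1 hk hst
      · rw [if_neg hemp]
        push_neg at hemp
        by_cases hne : (wordAt words (i - 1)).toList.getLast? ≠ curr.toList.head?
        · rw [if_pos hne]; trivial
        · rw [if_neg hne]
          push_neg at hne
          have hnostop' : ∀ k, 1 ≤ k → k < i + 1 → ¬ stopAt words k = true := by
            intro k hk1 hk hst
            rcases Nat.lt_or_ge k i with hki | hki
            · exact hnostop k hk1 hki hst
            · have hki' : k = i := by omega
              subst hki'
              simp only [stopAt, Bool.or_eq_true] at hst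
              rcases hst with (hd | hb) | he
              · exact hndup hd
              · simp only [brkAt, decide_eq_true_eq] at hb
                exact hb.2.2 (by rwa [hcurr])
              · simp only [errAt, Bool.and_eq_true, Bool.not_eq_true', decide_eq_true_eq] at he
                rcases he.2 with h1 | h2
                · exact hemp.1 h1
                · exact hemp.2 (by rwa [hcurr] at h2)
          have hmem' : ∀ x, PySem.Set.contains (PySem.Set.add mem curr) x = true ↔
              x ∈ words.take (i + 1) := by
            intro x
            rw [contains_iff_mem, PySem.Set.mem_add, List.take_succ, hget]
            simp [← hmem x]
          have hgood := ih (i + 1) (PySem.Set.add mem curr) (by omega) hrs hmem' hnostop'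
          simpa [hcurr] using hgood

-- ===== VERDICT (by name: the statement is the Claim_ definition above) =====
theorem solution_spec : Claim_equal_solution := by
  intro n words _ hpre
  unfold Spec_solution
  obtain ⟨_, hws⟩ := hpre
  cases words with
  | nil => rfl
  | cons w ws =>
    rw [solution_alt_eq]
    show solutionGo n (PySem.Set.add PySem.Set.empty w) w 1 ws = _
    have hdup : dupGo PySem.Set.empty 0 (w :: ws) = dupGo (PySem.Set.add PySem.Set.empty w) 1 ws := by
      show (if PySem.Set.contains PySem.Set.empty w then some 0
            else dupGo (PySem.Set.add PySem.Set.empty w) (0 + 1) ws) = _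
      rw [if_neg (by simp [PySem.Set.contains, PySem.Set.empty])]
      norm_num
    rw [hdup]
    have hgood : Good (PySem.Set.add PySem.Set.empty w) w ws := by
      have h := good_of_pre (w :: ws) hws ws 1 (PySem.Set.add PySem.Set.empty w)
        (le_refl 1) rfl
        (by intro x; simp [PySem.Set.contains, PySem.Set.add, PySem.Set.empty, eq_comm])
        (by intro k hk1 hk; omega)
      simpa [wordAt] using h
    exact go_eq n ws _ w 1 hgood
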